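-- pv_equiv track=rewrite | github.com/deangeckt/CLG-lab-CS-Clf | Miami-Bangor-LAB/categorial_subsequences_length_analysis.py | unite_subsequence_frequencies
-- ===== SOURCE A (Python) =====
-- def pad_with_zeros(input_vector, required_length):
--     padded_vector = input_vector.copy()
--     if len(input_vector) < required_length:
--         padded_vector = [0 for _ in range(required_length)]
--         for i in range(len(input_vector)):
--             padded_vector[i] = input_vector[i]
--     return padded_vector
--
-- def unite_subsequence_frequencies(tags_subsequence_length_frequency1, tags_subsequence_length_frequency2):
--     united_tags_subsequence_length_frequency = tags_subsequence_length_frequency1.copy()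
--
--     lang_tags1 = tags_subsequence_length_frequency1.keys()
--     lang_tags2 = tags_subsequence_length_frequency2.keys()
--     for lang_tag in lang_tags2:
--         if lang_tag in lang_tags1:
--             f1 = tags_subsequence_length_frequency1[lang_tag]
--             f2 = tags_subsequence_length_frequency2[lang_tag]
--             max_len = max(len(f1), len(f2))
--             f1_padded = pad_with_zeros(f1, required_length=max_len)
--             f2_padded = pad_with_zeros(f2, required_length=max_len)
--             united_tags_subsequence_length_frequency[lang_tag] = pad_with_zeros([], required_length=max_len)
--             for i in range(max_len):
--                 united_tags_subsequence_length_frequency[lang_tag][i] = f1_padded[i]+f2_padded[i]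
--         else:
--             united_tags_subsequence_length_frequency[lang_tag] = tags_subsequence_length_frequency2[lang_tag]
--
--     return united_tags_subsequence_length_frequency
-- ===== SOURCE B (Python) =====
-- def unite_subsequence_frequencies(tags_subsequence_length_frequency1, tags_subsequence_length_frequency2):
--     # Flattened-counter approach: stream every (key, index, count) entry of both
--     # dicts into one accumulator, recording each key's maximum vector length,
--     # then rebuild each vector from the accumulated per-index sums.
--     lengths = {}
--     counts = {}
--     for d in (tags_subsequence_length_frequency1, tags_subsequence_length_frequency2):
--         for k, v in d.items():
--             lengths[k] = max(lengths.get(k, 0), len(v))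
--             for i in range(len(v)):
--                 counts[(k, i)] = counts.get((k, i), 0) + v[i]
--     return {k: [counts.get((k, i), 0) for i in range(n)] for k, n in lengths.items()}
-- ===== Notes on version B (the rewrite author's own statement) =====
-- stated objective: alternative
-- what changed: B discards A's per-key branch/pad/add merge entirely: it streams every entry of both dicts once into a flattened (key,index)->sum counter plus a key->max-length table, then rebuilds each output vector from the accumulated sums, with no overlap test, no zero-padding helper and no in-place index mutation.
import Mathlib
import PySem

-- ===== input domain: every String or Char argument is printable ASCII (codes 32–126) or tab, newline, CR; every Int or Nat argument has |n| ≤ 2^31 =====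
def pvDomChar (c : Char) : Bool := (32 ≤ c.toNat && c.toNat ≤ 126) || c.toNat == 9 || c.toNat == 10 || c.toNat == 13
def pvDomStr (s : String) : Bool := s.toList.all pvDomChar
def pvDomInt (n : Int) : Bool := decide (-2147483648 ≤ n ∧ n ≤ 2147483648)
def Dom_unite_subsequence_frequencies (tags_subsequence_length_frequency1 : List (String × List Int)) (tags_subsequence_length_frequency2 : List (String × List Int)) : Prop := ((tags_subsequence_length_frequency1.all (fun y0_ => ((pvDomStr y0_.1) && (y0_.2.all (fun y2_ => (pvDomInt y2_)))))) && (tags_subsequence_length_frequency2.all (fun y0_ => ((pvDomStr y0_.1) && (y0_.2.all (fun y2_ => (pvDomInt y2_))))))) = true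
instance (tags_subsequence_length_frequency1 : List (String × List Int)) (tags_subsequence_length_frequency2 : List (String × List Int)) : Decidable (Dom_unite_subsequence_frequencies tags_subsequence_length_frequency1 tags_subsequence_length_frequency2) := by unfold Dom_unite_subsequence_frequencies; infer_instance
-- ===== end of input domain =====

-- B replaces A's per-key branch-pad-and-add merge by one flattened pass accumulating a
-- (key,index)→sum counter and a key→max-length table, then rebuilding (objective: alternative).

-- ===== PORT A =====
-- padded[i] = input_vector[i] with 0 ≤ i < len is exact as getD i 0
def pad_with_zeros (input_vector : List Int) (required_length : Int) : List Int :=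
  if (input_vector.length : Int) < required_length then
    (List.range input_vector.length).foldl
      (fun padded i => padded.set i (input_vector.getD i 0))
      (List.replicate required_length.toNat 0)
  else input_vector

-- the in-place assignment united[lang_tag][i] = … is modelled as Dict.modify at lang_tag
-- replacing the stored list by its .set i …; f[i] with 0 ≤ i < max_len is exact as getD i 0
def unite_subsequence_frequencies (tags_subsequence_length_frequency1 : List (String × List Int)) (tags_subsequence_length_frequency2 : List (String × List Int)) : List (String × List Int) :=
  let d1 := PySem.Dict.ofList tags_subsequence_length_frequency1
  let d2 := PySem.Dict.ofList tags_subsequence_length_frequency2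
  let united :=
    d2.keys.foldl (fun u lang_tag =>
      if d1.contains lang_tag then
        let f1 := d1.getD lang_tag []
        let f2 := d2.getD lang_tag []
        let max_len : Int := max (f1.length : Int) (f2.length : Int)
        let f1_padded := pad_with_zeros f1 max_len
        let f2_padded := pad_with_zeros f2 max_len
        let u' := u.insert lang_tag (pad_with_zeros [] max_len)
        (List.range max_len.toNat).foldl
          (fun u i => u.modify lang_tag []
            (fun v => v.set i (f1_padded.getD i 0 + f2_padded.getD i 0)))
          u'
      else u.insert lang_tag (d2.getD lang_tag []))
      d1
  united.items

-- ===== PORT B =====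
-- the two nested Python loops over (d1, d2) are one fold over d1.items ++ d2.items;
-- lengths.get(k, 0) / counts.get((k,i), 0) are getD, v[i] with i in range(len(v)) is getD i 0;
-- the final dict comprehension iterates lengths (distinct keys), so its items are this map;
-- range(n) with n = a stored max length (always ≥ 0) is List.range n.toNat
def unite_subsequence_frequencies_alt (tags_subsequence_length_frequency1 : List (String × List Int)) (tags_subsequence_length_frequency2 : List (String × List Int)) : List (String × List Int) :=
  let d1 := PySem.Dict.ofList tags_subsequence_length_frequency1
  let d2 := PySem.Dict.ofList tags_subsequence_length_frequency2
  let st := (d1.items ++ d2.items).foldl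
    (fun (st : PySem.Dict String Int × PySem.Dict (String × Nat) Int) p =>
      (st.1.insert p.1 (max (st.1.getD p.1 0) (p.2.length : Int)),
       (List.range p.2.length).foldl
         (fun c i => c.insert (p.1, i) (c.getD (p.1, i) 0 + p.2.getD i 0)) st.2))
    (PySem.Dict.empty, PySem.Dict.empty)
  st.1.items.map (fun kn => (kn.1, (List.range kn.2.toNat).map (fun i => st.2.getD (kn.1, i) 0)))

-- ===== PRECONDITION & SPEC =====
def Spec_unite_subsequence_frequencies (tags_subsequence_length_frequency1 : List (String × List Int)) (tags_subsequence_length_frequency2 : List (String × List Int)) (out : List (String × List Int)) : Prop := out = unite_subsequence_frequencies_alt tags_subsequence_length_frequency1 tags_subsequence_length_frequency2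
instance (tags_subsequence_length_frequency1 : List (String × List Int)) (tags_subsequence_length_frequency2 : List (String × List Int)) (out : List (String × List Int)) : Decidable (Spec_unite_subsequence_frequencies tags_subsequence_length_frequency1 tags_subsequence_length_frequency2 out) := by unfold Spec_unite_subsequence_frequencies; infer_instance

-- ===== CLAIM (what is proved, stated in full; the proofs are below) =====
def Claim_equal_unite_subsequence_frequencies : Prop := ∀ (tags_subsequence_length_frequency1 : List (String × List Int)) (tags_subsequence_length_frequency2 : List (String × List Int)), Dom_unite_subsequence_frequencies tags_subsequence_length_frequency1 tags_subsequence_length_frequency2 → Spec_unite_subsequence_frequencies tags_subsequence_length_frequency1 tags_subsequence_length_frequency2 (unite_subsequence_frequencies tags_subsequence_length_frequency1 tags_subsequence_length_frequency2)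

-- ===== LEMMAS AND PROOFS =====

-- the element-wise sum both programs produce at a key present in both dicts
def combineVec (v1 v2 : List Int) : List Int :=
  (List.range (max v1.length v2.length)).map (fun i => v1.getD i 0 + v2.getD i 0)

-- the value A stores at key k
def uniteVal (d1 d2 : PySem.Dict String (List Int)) (k : String) : List Int :=
  if d1.contains k then combineVec (d1.getD k []) (d2.getD k []) else d2.getD k []

-- maximum vector length recorded for key k while scanning L
def lenSpec : List (String × List Int) → String → Int
  | [], _ => 0
  | p :: L, k => if p.1 = k then max (p.2.length : Int) (lenSpec L k) else lenSpec L k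

-- accumulated sum at (k, i) while scanning L
def cntSpec : List (String × List Int) → String → Nat → Int
  | [], _, _ => 0
  | p :: L, k, i => (if p.1 = k then p.2.getD i 0 else 0) + cntSpec L k i

-- ---- generic lemmas ----

theorem dictModify_eq (d : PySem.Dict String (List Int)) (k : String)
    (d0 : List Int) (f : List Int → List Int) :
    d.modify k d0 f = d.insert k (f (d.getD k d0)) := by
  simp [PySem.Dict.modify]

theorem inner_fold_eq (F : Nat → List Int → List Int) :
    ∀ (is : List Nat) (u : PySem.Dict String (List Int)) (k : String) (b : List Int),
    is.foldl (fun u i => u.modify k [] (F i)) (u.insert k b)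
      = u.insert k (is.foldl (fun v i => F i v) b) := by
  intro is
  induction is with
  | nil => intro u k b; rfl
  | cons i is ih =>
    intro u k b
    simp only [List.foldl_cons]
    rw [dictModify_eq, PySem.Dict.getD_insert_self, PySem.Dict.insert_insert_self, ih]

theorem foldl_set_prefix (g : Nat → Int) :
    ∀ (m : Nat) (b : List Int), m ≤ b.length →
    (List.range m).foldl (fun v i => v.set i (g i)) b = (List.range m).map g ++ b.drop m := by
  intro m
  induction m with
  | zero => intro b _; simp
  | succ m ih =>
    intro b hm
    have hdrop : b.drop m = b[m] :: b.drop (m + 1) := List.drop_eq_getElem_cons (by omega)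
    have hlen : (List.map g (List.range m)).length = m := by simp
    rw [List.range_succ, List.foldl_append, ih b (by omega), List.foldl_cons, List.foldl_nil,
        List.map_append, List.set_append, hlen, if_neg (lt_irrefl m), Nat.sub_self, hdrop,
        List.set_cons_zero, List.map_cons, List.map_nil, List.append_assoc, List.cons_append,
        List.nil_append]

theorem map_range_getD (f : List Int) :
    (List.range f.length).map (fun i => f.getD i 0) = f := by
  apply List.ext_getElem
  · simp
  · intro i h1 h2
    simp [List.getD_eq_getElem?_getD, List.getElem?_eq_getElem h2]

theorem pad_eq (f : List Int) (n : Int) :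
    pad_with_zeros f n =
      if (f.length : Int) < n then f ++ List.replicate (n.toNat - f.length) 0 else f := by
  unfold pad_with_zeros
  split
  · rename_i h
    have hle : f.length ≤ (List.replicate n.toNat (0:Int)).length := by
      simp only [List.length_replicate]; omega
    rw [foldl_set_prefix _ _ _ hle, map_range_getD, List.drop_replicate]
  · rfl

theorem pad_getD (f : List Int) (n : Int) (i : Nat) :
    (pad_with_zeros f n).getD i 0 = f.getD i 0 := by
  rw [pad_eq]
  split
  · rcases Nat.lt_or_ge i f.length with hi | hi
    · rw [List.getD_append _ _ _ _ hi]
    · rw [List.getD_eq_default f _ hi, List.getD_append_right _ _ _ _ hi]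
      rcases Nat.lt_or_ge (i - f.length) (n.toNat - f.length) with hj | hj
      · exact List.getD_replicate _ hj
      · exact List.getD_eq_default _ _ (by simpa using hj)
  · rfl

theorem pad_nil (n : Int) : pad_with_zeros [] n = List.replicate n.toNat 0 := by
  rw [pad_eq]
  split
  · simp
  · rename_i h
    have h0 : n.toNat = 0 := by
      simp only [List.length_nil, Nat.cast_zero] at h
      omega
    simp [h0]

theorem combineVec_nil_left (v : List Int) : combineVec [] v = v := by
  unfold combineVec
  simpa using map_range_getD v

theorem combineVec_nil_right (v : List Int) : combineVec v [] = v := by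
  unfold combineVec
  simp only [List.length_nil, Nat.max_zero, List.getD_nil, Int.add_zero]
  exact map_range_getD v

-- the list A assembles index by index is combineVec
theorem inner_list_eq (f1 f2 : List Int) :
    (List.range (max (f1.length : Int) (f2.length : Int)).toNat).foldl
      (fun v i => v.set i ((pad_with_zeros f1 (max (f1.length : Int) (f2.length : Int))).getD i 0
                          + (pad_with_zeros f2 (max (f1.length : Int) (f2.length : Int))).getD i 0))
      (pad_with_zeros [] (max (f1.length : Int) (f2.length : Int)))
    = combineVec f1 f2 := by
  have hn : (max (f1.length : Int) (f2.length : Int)).toNat = max f1.length f2.length := by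
    omega
  rw [pad_nil,
      foldl_set_prefix _ _ _ (by simp),
      List.drop_replicate]
  simp only [hn, Nat.sub_self, List.replicate_zero, List.append_nil]
  unfold combineVec
  apply List.map_congr_left
  intro i _
  rw [pad_getD, pad_getD]

-- folding inserts of valA over distinct keys: items are d1's items (overlaps rewritten)
-- followed by the fresh keys in order
theorem a_fold_items (valA : String → List Int) :
    ∀ (ks : List String) (u : PySem.Dict String (List Int)), ks.Nodup → u.keys.Nodup →
    (ks.foldl (fun u k => u.insert k (valA k)) u).items =
      u.items.map (fun p => if p.1 ∈ ks then (p.1, valA p.1) else p)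
      ++ (ks.filter (fun k => !u.contains k)).map (fun k => (k, valA k)) := by
  intro ks
  induction ks with
  | nil => intro u _ _; simp
  | cons k ks ih =>
    intro u hnd hu
    have hknotin : k ∉ ks := (List.nodup_cons.mp hnd).1
    have hnd' : ks.Nodup := (List.nodup_cons.mp hnd).2
    simp only [List.foldl_cons]
    rw [ih (u.insert k (valA k)) hnd' (PySem.Dict.nodup_keys_insert _ _ _ hu)]
    by_cases hc : u.contains k = true
    · rw [PySem.Dict.items_insert_of_contains _ _ hc]
      rw [List.map_map]
      congr 1
      · apply List.map_congr_left
        intro p _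
        by_cases hpk : p.1 = k
        · simp [Function.comp, hpk, List.mem_cons, hknotin]
        · by_cases hin : p.1 ∈ ks
          · simp [Function.comp, hpk, List.mem_cons, hin]
          · simp [Function.comp, hpk, List.mem_cons, hin]
      · rw [List.filter_cons_of_neg (by simp [hc])]
        apply congrArg
        apply List.filter_congr
        intro k' hk'
        have : k' ≠ k := fun h => hknotin (h ▸ hk')
        simp [PySem.Dict.contains_insert, this]
    · rw [PySem.Dict.items_insert_of_not_contains _ _ (by simpa using hc)]
      have hkeys : ∀ p ∈ u.items, p.1 ≠ k := by
        intro p hp hpk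
        have : u.contains p.1 = true := by
          rw [PySem.Dict.contains_iff_mem_keys]
          exact PySem.Dict.mem_keys_of_mem_items _ hp
        rw [hpk] at this
        exact hc this
      rw [List.map_append]
      have h1 : u.items.map (fun p => if p.1 ∈ ks then (p.1, valA p.1) else p)
          = u.items.map (fun p => if p.1 ∈ k :: ks then (p.1, valA p.1) else p) := by
        apply List.map_congr_left
        intro p hp
        simp [List.mem_cons, hkeys p hp]
      rw [h1]
      rw [List.filter_cons_of_pos (by simp [hc]), List.map_cons]
      have h2 : ks.filter (fun k' => !(u.insert k (valA k)).contains k')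
          = ks.filter (fun k' => !u.contains k') := by
        apply List.filter_congr
        intro k' hk'
        have : k' ≠ k := fun h => hknotin (h ▸ hk')
        simp [PySem.Dict.contains_insert, this]
      rw [h2]
      simp [List.append_assoc, hknotin]

-- ---- B-side lemmas ----

-- a fold whose two state components never interact is a pair of folds
theorem foldl_prod {α β γ : Type} (f : α → γ → α) (g : β → γ → β) :
    ∀ (L : List γ) (a : α) (b : β),
    L.foldl (fun st p => (f st.1 p, g st.2 p)) (a, b) = (L.foldl f a, L.foldl g b) := by
  intro L
  induction L with
  | nil => intro a b; rfl
  | cons p L ih => intro a b; simp only [List.foldl_cons]; exact ih _ _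

-- effect of the inner counting loop over one vector on any counter cell
theorem cnt_inner (q : String) (v : List Int) :
    ∀ (m : Nat) (c : PySem.Dict (String × Nat) Int) (k : String) (i : Nat),
    ((List.range m).foldl
        (fun c i => c.insert (q, i) (c.getD (q, i) 0 + v.getD i 0)) c).getD (k, i) 0
      = c.getD (k, i) 0 + (if k = q ∧ i < m then v.getD i 0 else 0) := by
  intro m
  induction m with
  | zero => intro c k i; simp
  | succ m ih =>
    intro c k i
    rw [List.range_succ, List.foldl_append, List.foldl_cons, List.foldl_nil,
        PySem.Dict.getD_insert]
    by_cases hk : ((k, i) : String × Nat) = (q, m)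
    · have hk1 : k = q := congrArg Prod.fst hk
      have hk2 : i = m := congrArg Prod.snd hk
      rw [if_pos hk, ih]
      subst hk1; subst hk2
      simp
    · rw [if_neg hk, ih]
      by_cases hkq : k = q
      · subst hkq
        have him : i ≠ m := fun h => hk (by rw [h])
        by_cases hlt : i < m
        · simp [hlt, Nat.lt_succ_of_lt hlt]
        · have : ¬ i < m + 1 := by omega
          simp [hlt, this]
      · simp [hkq]

-- the whole scan accumulates cntSpec
theorem cnt_fold :
    ∀ (L : List (String × List Int)) (c : PySem.Dict (String × Nat) Int) (k : String) (i : Nat),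
    (L.foldl (fun c p => (List.range p.2.length).foldl
        (fun c i => c.insert (p.1, i) (c.getD (p.1, i) 0 + p.2.getD i 0)) c) c).getD (k, i) 0
      = c.getD (k, i) 0 + cntSpec L k i := by
  intro L
  induction L with
  | nil => intro c k i; simp [cntSpec]
  | cons p L ih =>
    intro c k i
    rw [List.foldl_cons, ih, cnt_inner]
    have hstep : cntSpec (p :: L) k i = (if p.1 = k then p.2.getD i 0 else 0) + cntSpec L k i := rfl
    rw [hstep]
    by_cases hk : p.1 = k
    · subst hk
      rw [if_pos rfl]
      by_cases hlt : i < p.2.length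
      · rw [if_pos ⟨rfl, hlt⟩]; ring
      · rw [if_neg (fun h => hlt h.2), List.getD_eq_default _ _ (by omega)]; ring
    · rw [if_neg hk, if_neg (fun h => hk h.1.symm)]; ring

theorem lenSpec_nonneg : ∀ (L : List (String × List Int)) (k : String), 0 ≤ lenSpec L k := by
  intro L
  induction L with
  | nil => intro k; simp [lenSpec]
  | cons p L ih =>
    intro k
    unfold lenSpec
    split
    · exact le_trans (ih k) (le_max_right _ _)
    · exact ih k

-- the whole scan records max lengths
theorem len_fold :
    ∀ (L : List (String × List Int)) (m : PySem.Dict String Int) (k : String),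
    0 ≤ m.getD k 0 →
    (L.foldl (fun m p => m.insert p.1 (max (m.getD p.1 0) (p.2.length : Int))) m).getD k 0
      = max (m.getD k 0) (lenSpec L k) := by
  intro L
  induction L with
  | nil =>
    intro m k h
    simp [lenSpec, max_eq_left h]
  | cons p L ih =>
    intro m k h
    rw [List.foldl_cons]
    have hstep : lenSpec (p :: L) k
        = if p.1 = k then max (p.2.length : Int) (lenSpec L k) else lenSpec L k := rfl
    have hins : (m.insert p.1 (max (m.getD p.1 0) (p.2.length : Int))).getD k 0
        = if k = p.1 then max (m.getD p.1 0) (p.2.length : Int) else m.getD k 0 := by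
      rw [PySem.Dict.getD_insert]
    by_cases hk : p.1 = k
    · subst hk
      rw [ih _ _ (by rw [hins, if_pos rfl]; positivity), hins, if_pos rfl, hstep, if_pos rfl,
          max_assoc]
    · have hk' : ¬ k = p.1 := fun h' => hk (Eq.symm h')
      rw [ih _ _ (by rw [hins, if_neg hk']; exact h), hins, if_neg hk', hstep, if_neg hk]

-- lenSpec / cntSpec over an append
theorem lenSpec_append (L1 L2 : List (String × List Int)) (k : String) :
    lenSpec (L1 ++ L2) k = max (lenSpec L1 k) (lenSpec L2 k) := by
  induction L1 with
  | nil => simp [lenSpec, max_eq_right (lenSpec_nonneg L2 k)]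
  | cons p L1 ih =>
    have h1 : lenSpec ((p :: L1) ++ L2) k
        = if p.1 = k then max (p.2.length : Int) (lenSpec (L1 ++ L2) k) else lenSpec (L1 ++ L2) k := rfl
    have h2 : lenSpec (p :: L1) k
        = if p.1 = k then max (p.2.length : Int) (lenSpec L1 k) else lenSpec L1 k := rfl
    rw [h1, h2, ih]
    by_cases hk : p.1 = k
    · rw [if_pos hk, if_pos hk, max_assoc]
    · rw [if_neg hk, if_neg hk]

theorem cntSpec_append (L1 L2 : List (String × List Int)) (k : String) (i : Nat) :
    cntSpec (L1 ++ L2) k i = cntSpec L1 k i + cntSpec L2 k i := by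
  induction L1 with
  | nil => simp [cntSpec]
  | cons p L1 ih =>
    have h1 : cntSpec ((p :: L1) ++ L2) k i
        = (if p.1 = k then p.2.getD i 0 else 0) + cntSpec (L1 ++ L2) k i := rfl
    have h2 : cntSpec (p :: L1) k i
        = (if p.1 = k then p.2.getD i 0 else 0) + cntSpec L1 k i := rfl
    rw [h1, h2, ih, Int.add_assoc]

-- lenSpec / cntSpec over a dict's items
theorem lenSpec_not_mem (l : List (String × List Int)) (k : String)
    (h : k ∉ l.map (·.1)) : lenSpec l k = 0 := by
  induction l with
  | nil => rfl
  | cons p l ih =>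
    simp only [List.map_cons, List.mem_cons] at h
    push_neg at h
    unfold lenSpec
    rw [if_neg (fun h' => h.1 h'.symm)]
    exact ih h.2

theorem cntSpec_not_mem (l : List (String × List Int)) (k : String) (i : Nat)
    (h : k ∉ l.map (·.1)) : cntSpec l k i = 0 := by
  induction l with
  | nil => rfl
  | cons p l ih =>
    simp only [List.map_cons, List.mem_cons] at h
    push_neg at h
    unfold cntSpec
    rw [if_neg (fun h' => h.1 h'.symm), ih h.2]
    simp

theorem lenSpec_mem (l : List (String × List Int)) (k : String) (v : List Int)
    (hnd : (l.map (·.1)).Nodup) (hmem : (k, v) ∈ l) : lenSpec l k = (v.length : Int) := by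
  induction l with
  | nil => cases hmem
  | cons p l ih =>
    rw [List.map_cons, List.nodup_cons] at hnd
    rcases List.mem_cons.mp hmem with h | h
    · subst h
      unfold lenSpec
      rw [if_pos rfl, lenSpec_not_mem l k hnd.1, max_eq_left (by positivity)]
    · have hpk : p.1 ≠ k := by
        intro h'
        exact hnd.1 (h' ▸ List.mem_map_of_mem h)
      unfold lenSpec
      rw [if_neg hpk]
      exact ih hnd.2 h

theorem cntSpec_mem (l : List (String × List Int)) (k : String) (v : List Int) (i : Nat)
    (hnd : (l.map (·.1)).Nodup) (hmem : (k, v) ∈ l) : cntSpec l k i = v.getD i 0 := by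
  induction l with
  | nil => cases hmem
  | cons p l ih =>
    rw [List.map_cons, List.nodup_cons] at hnd
    rcases List.mem_cons.mp hmem with h | h
    · subst h
      unfold cntSpec
      rw [if_pos rfl, cntSpec_not_mem l k i hnd.1, Int.add_zero]
    · have hpk : p.1 ≠ k := by
        intro h'
        exact hnd.1 (h' ▸ List.mem_map_of_mem h)
      unfold cntSpec
      rw [if_neg hpk, ih hnd.2 h, Int.zero_add]

theorem lenSpec_dict (d : PySem.Dict String (List Int)) (hnd : d.keys.Nodup) (k : String) :
    lenSpec d.items k = (((d.getD k []).length : Int)) := by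
  by_cases hc : d.contains k = true
  · have hsome : (d.get? k).isSome := by
      rw [← PySem.Dict.contains_eq_isSome_get?]; exact hc
    obtain ⟨v, hv⟩ := Option.isSome_iff_exists.mp hsome
    rw [PySem.Dict.getD_of_get?_eq_some _ _ hv]
    exact lenSpec_mem _ _ _ hnd (PySem.Dict.mem_items_of_get?_eq_some _ hv)
  · have hcf : d.contains k = false := by simpa using hc
    rw [PySem.Dict.getD_of_not_contains _ _ hcf]
    apply lenSpec_not_mem
    rw [PySem.Dict.contains_eq_decide_mem_keys] at hcf
    simpa [PySem.Dict.keys] using of_decide_eq_false hcf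
  
theorem cntSpec_dict (d : PySem.Dict String (List Int)) (hnd : d.keys.Nodup) (k : String) (i : Nat) :
    cntSpec d.items k i = (d.getD k []).getD i 0 := by
  by_cases hc : d.contains k = true
  · have hsome : (d.get? k).isSome := by
      rw [← PySem.Dict.contains_eq_isSome_get?]; exact hc
    obtain ⟨v, hv⟩ := Option.isSome_iff_exists.mp hsome
    rw [PySem.Dict.getD_of_get?_eq_some _ _ hv]
    exact cntSpec_mem _ _ _ _ hnd (PySem.Dict.mem_items_of_get?_eq_some _ hv)
  · have hcf : d.contains k = false := by simpa using hc
    rw [PySem.Dict.getD_of_not_contains _ _ hcf]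
    simp only [List.getD_nil]
    apply cntSpec_not_mem
    rw [PySem.Dict.contains_eq_decide_mem_keys] at hcf
    simpa [PySem.Dict.keys] using of_decide_eq_false hcf

-- ===== VERDICT (by name: the statement is the Claim_ definition above) =====
theorem unite_subsequence_frequencies_spec : Claim_equal_unite_subsequence_frequencies := by
  intro l1 l2 _
  unfold Spec_unite_subsequence_frequencies
  unfold unite_subsequence_frequencies unite_subsequence_frequencies_alt
  simp only []
  set d1 := PySem.Dict.ofList l1 with hd1
  set d2 := PySem.Dict.ofList l2 with hd2
  have hnd1 : d1.keys.Nodup := PySem.Dict.nodup_keys_ofList _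
  have hnd2 : d2.keys.Nodup := PySem.Dict.nodup_keys_ofList _
  -- the common canonical form both sides are reduced to
  have goalEq : ∀ (x y : List (String × List Int)),
      x = (d1.keys ++ d2.keys.filter (fun k => !d1.contains k)).map
            (fun k => (k, combineVec (d1.getD k []) (d2.getD k []))) →
      y = (d1.keys ++ d2.keys.filter (fun k => !d1.contains k)).map
            (fun k => (k, combineVec (d1.getD k []) (d2.getD k []))) →
      x = y := by
    intro x y hx hy; rw [hx, hy]
  apply goalEq
  · -- A side
    have hbody : (fun (u : PySem.Dict String (List Int)) lang_tag =>
        if d1.contains lang_tag then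
          let f1 := d1.getD lang_tag []
          let f2 := d2.getD lang_tag []
          let max_len : Int := max (f1.length : Int) (f2.length : Int)
          let f1_padded := pad_with_zeros f1 max_len
          let f2_padded := pad_with_zeros f2 max_len
          let u' := u.insert lang_tag (pad_with_zeros [] max_len)
          (List.range max_len.toNat).foldl
            (fun u i => u.modify lang_tag []
              (fun v => v.set i (f1_padded.getD i 0 + f2_padded.getD i 0)))
            u'
        else u.insert lang_tag (d2.getD lang_tag []))
        = (fun u k => u.insert k (uniteVal d1 d2 k)) := by
      funext u k
      unfold uniteVal
      by_cases hc : d1.contains k = true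
      · simp only [hc, if_true]
        rw [inner_fold_eq, inner_list_eq]
      · simp only [hc, if_false, Bool.false_eq_true]
    rw [hbody]
    rw [a_fold_items (uniteVal d1 d2) d2.keys d1 hnd2 hnd1]
    rw [PySem.Dict.items_eq_map_keys d1 hnd1 [], List.map_map, List.map_append]
    congr 1
    · apply List.map_congr_left
      intro k hk
      have hc1 : d1.contains k = true := by
        rw [PySem.Dict.contains_iff_mem_keys]; exact hk
      by_cases hk2 : k ∈ d2.keys
      · simp only [Function.comp_apply, if_pos hk2]
        unfold uniteVal
        rw [if_pos hc1]
      · simp only [Function.comp_apply, if_neg hk2]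
        have hc2 : d2.contains k = false := by
          rw [PySem.Dict.contains_eq_decide_mem_keys]; simpa using hk2
        rw [PySem.Dict.getD_of_not_contains _ _ hc2, combineVec_nil_right]
    · apply List.map_congr_left
      intro k hk
      have hcf : d1.contains k = false := by
        have := List.of_mem_filter hk
        simpa using this
      unfold uniteVal
      rw [hcf]
      simp only [Bool.false_eq_true, if_false]
      rw [PySem.Dict.getD_of_not_contains _ _ hcf, combineVec_nil_left]
  · -- B side
    have hsplit := foldl_prod
      (fun (m : PySem.Dict String Int) (p : String × List Int) =>
        m.insert p.1 (max (m.getD p.1 0) (p.2.length : Int)))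
      (fun (c : PySem.Dict (String × Nat) Int) (p : String × List Int) =>
        (List.range p.2.length).foldl
          (fun c i => c.insert (p.1, i) (c.getD (p.1, i) 0 + p.2.getD i 0)) c)
      (d1.items ++ d2.items) PySem.Dict.empty PySem.Dict.empty
    rw [hsplit]
    have hndL : ((PySem.Dict.empty : PySem.Dict String Int).keys).Nodup := by
      simp [PySem.Dict.keys_empty]
    have hndK : ((d1.items ++ d2.items).foldl
        (fun m p => m.insert p.1 (max (m.getD p.1 0) (p.2.length : Int)))
        PySem.Dict.empty).keys.Nodup :=
      PySem.Dict.nodup_keys_foldl_insert_key _ _ _ _ hndL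
    rw [PySem.Dict.items_eq_map_keys _ hndK 0, List.map_map]
    have hmapfst : (d1.items ++ d2.items).map (fun p => p.1) = d1.keys ++ d2.keys := by
      rw [List.map_append]; rfl
    have hkeys : ((d1.items ++ d2.items).foldl
        (fun m p => m.insert p.1 (max (m.getD p.1 0) (p.2.length : Int)))
        PySem.Dict.empty).keys = d1.keys ++ d2.keys.filter (fun k => !d1.contains k) := by
      have hk0 := PySem.Dict.keys_foldl_insert_key (d1.items ++ d2.items)
        (fun p : String × List Int => p.1)
        (fun (m : PySem.Dict String Int) (p : String × List Int) =>
          max (m.getD p.1 0) (p.2.length : Int))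
        PySem.Dict.empty
      rw [hk0, hmapfst, PySem.Dict.keys_empty]
      show PySem.Set.update ([] : PySem.Set String) _ = _
      rw [PySem.Set.update_nil_left, PySem.Set.ofList_append,
          PySem.Set.ofList_eq_self_of_nodup _ hnd1,
          PySem.Set.update_eq_append_filter,
          PySem.Set.ofList_eq_self_of_nodup _ hnd2]
      congr 1
      apply List.filter_congr
      intro k hk
      simp [PySem.Dict.contains_eq_decide_mem_keys]
    rw [hkeys]
    apply List.map_congr_left
    intro k hk
    simp only [Function.comp_apply]
    have hlen : ((d1.items ++ d2.items).foldl
        (fun m p => m.insert p.1 (max (m.getD p.1 0) (p.2.length : Int)))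
        PySem.Dict.empty).getD k 0
        = max ((d1.getD k []).length : Int) ((d2.getD k []).length : Int) := by
      rw [len_fold _ _ _ (by simp), PySem.Dict.getD_empty,
          lenSpec_append, lenSpec_dict d1 hnd1, lenSpec_dict d2 hnd2,
          max_eq_right (le_max_of_le_left (by positivity))]
    have hcnt : ∀ i : Nat, ((d1.items ++ d2.items).foldl
        (fun c p => (List.range p.2.length).foldl
          (fun c i => c.insert (p.1, i) (c.getD (p.1, i) 0 + p.2.getD i 0)) c)
        PySem.Dict.empty).getD (k, i) 0
        = (d1.getD k []).getD i 0 + (d2.getD k []).getD i 0 := by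
      intro i
      rw [cnt_fold, PySem.Dict.getD_empty, cntSpec_append,
          cntSpec_dict d1 hnd1, cntSpec_dict d2 hnd2, Int.zero_add]
    rw [hlen]
    have htn : (max ((d1.getD k []).length : Int) ((d2.getD k []).length : Int)).toNat
        = max (d1.getD k []).length (d2.getD k []).length := by omega
    rw [htn]
    unfold combineVec
    congr 1
    apply List.map_congr_left
    intro i _
    rw [hcnt i]
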